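-- pv_equiv track=rewrite | github.com/ArturGrigoryan1/My-hometasks | Jenkins_hometasks/hometask_01_03_24/get_uniqes.py | get_uniques
-- ===== SOURCE A (Python) =====
-- def get_uniques(mstr1,mstr2):
--     ms1 = ""
--     for el in mstr1:
--         if el not in mstr2:
--             ms1 += el
--     for el in mstr2:
--         if el not in mstr1:
--             ms1 += el
--     return ms1
-- ===== SOURCE B (Python) =====
-- def get_uniques(mstr1, mstr2):
--     s = mstr1 + mstr2
--     for ch in set(mstr1) & set(mstr2):
--         s = s.replace(ch, '')
--     return s
-- ===== Notes on version B (the rewrite author's own statement) =====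
-- stated objective: alternative
-- what changed: Instead of filtering each string by per-character scans of the other, B starts from the full concatenation and iterates over the alphabet of common characters, deleting all occurrences of each with str.replace; correct because a character survives iff it is not shared, and deletions commute so set iteration order does not matter.
import Mathlib
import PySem

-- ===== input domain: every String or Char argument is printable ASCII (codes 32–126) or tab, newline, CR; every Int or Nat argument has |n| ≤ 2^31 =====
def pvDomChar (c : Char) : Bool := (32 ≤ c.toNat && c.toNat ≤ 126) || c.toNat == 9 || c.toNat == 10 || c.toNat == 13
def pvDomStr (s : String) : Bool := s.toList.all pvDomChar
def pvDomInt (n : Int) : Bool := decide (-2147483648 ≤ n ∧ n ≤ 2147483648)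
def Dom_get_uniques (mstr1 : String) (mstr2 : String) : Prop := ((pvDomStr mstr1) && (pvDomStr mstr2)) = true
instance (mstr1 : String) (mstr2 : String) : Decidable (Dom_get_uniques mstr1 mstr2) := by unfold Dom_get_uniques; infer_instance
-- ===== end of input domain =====

-- B starts from the concatenation and deletes every common character with str.replace,
-- iterating over the distinct common characters instead of scanning per input character;
-- same return value as A (deletions commute, so set iteration order cannot matter).

-- ===== PORT A =====
-- two loops, each appending chars absent from the other string
def get_uniques (mstr1 : String) (mstr2 : String) : String :=
  let ms1 : List Char :=
    mstr1.toList.foldl (fun acc el => if mstr2.toList.contains el then acc else acc ++ [el]) []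
  let ms2 : List Char :=
    mstr2.toList.foldl (fun acc el => if mstr1.toList.contains el then acc else acc ++ [el]) ms1
  String.ofList ms2

-- ===== PORT B =====
-- s = mstr1 + mstr2; for ch in set(mstr1) & set(mstr2): s = s.replace(ch, ''); return s
-- (the Python result is independent of set iteration order: deleting all occurrences of
-- distinct characters commutes; the port iterates in Set.inter's list order)
def get_uniques_alt (mstr1 : String) (mstr2 : String) : String :=
  let common : PySem.Set Char := PySem.Set.inter (PySem.Set.ofList mstr1.toList) mstr2.toList
  common.foldl (fun s ch => PySem.Str.replace s (String.ofList [ch]) "") (mstr1 ++ mstr2)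

-- ===== PRECONDITION & SPEC =====
def Spec_get_uniques (mstr1 : String) (mstr2 : String) (out : String) : Prop := out = get_uniques_alt mstr1 mstr2
instance (mstr1 : String) (mstr2 : String) (out : String) : Decidable (Spec_get_uniques mstr1 mstr2 out) := by unfold Spec_get_uniques; infer_instance

-- ===== CLAIM (what is proved, stated in full; the proofs are below) =====
def Claim_equal_get_uniques : Prop := ∀ (mstr1 : String) (mstr2 : String), Dom_get_uniques mstr1 mstr2 → Spec_get_uniques mstr1 mstr2 (get_uniques mstr1 mstr2)

-- ===== LEMMAS AND PROOFS =====

-- A's append-loop is a filter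
theorem foldl_skip_eq_filter {α : Type} (p : α → Bool) (l acc : List α) :
    l.foldl (fun acc el => if p el then acc else acc ++ [el]) acc = acc ++ l.filter (fun el => !p el) := by
  induction l generalizing acc with
  | nil => simp
  | cons x xs ih =>
    by_cases h : p x = true <;> simp [List.foldl_cons, h, ih]

-- replace of a single-character pattern by "" removes exactly that character
theorem replace_go_single (c : Char) (fuel : Nat) (l acc : List Char) (h : l.length ≤ fuel) :
    PySem.Chars.replace.go [c] [] fuel l acc = acc.reverse ++ l.filter (fun x => x != c) := by
  induction fuel generalizing l acc with
  | zero =>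
    have : l = [] := List.length_eq_zero_iff.mp (Nat.le_zero.mp h)
    subst this; simp [PySem.Chars.replace.go]
  | succ n ih =>
    cases l with
    | nil => simp [PySem.Chars.replace.go]
    | cons x t =>
      have ht : t.length ≤ n := by simpa using h
      by_cases hx : x = c
      · subst hx
        simp [PySem.Chars.replace.go, List.isPrefixOf, ih _ _ ht]
      · simp [PySem.Chars.replace.go, List.isPrefixOf,
          (Ne.symm hx : c ≠ x), ih _ _ ht, hx]

theorem chars_replace_single (c : Char) (l : List Char) :
    PySem.Chars.replace l [c] [] = l.filter (fun x => x != c) := by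
  rw [PySem.Chars.replace, if_neg (by simp)]
  exact replace_go_single c l.length l [] le_rfl

-- the B fold on Strings, moved to toList
theorem alt_fold_eq (cs : List Char) (s : String) :
    (cs.foldl (fun s ch => PySem.Str.replace s (String.ofList [ch]) "") s).toList
      = s.toList.filter (fun x => !cs.contains x) := by
  induction cs generalizing s with
  | nil => simp
  | cons c rest ih =>
    rw [List.foldl_cons, ih]
    have : (PySem.Str.replace s (String.ofList [c]) "").toList = s.toList.filter (fun x => x != c) := by
      simp [PySem.Str.replace, chars_replace_single]
    rw [this, List.filter_filter]
    apply List.filter_congr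
    intro x _
    by_cases hx : x = c <;> simp [hx]

theorem get_uniques_eq (mstr1 mstr2 : String) :
    get_uniques mstr1 mstr2 = get_uniques_alt mstr1 mstr2 := by
  apply String.ext
  show (get_uniques mstr1 mstr2).toList = _
  unfold get_uniques get_uniques_alt
  rw [alt_fold_eq]
  simp only [foldl_skip_eq_filter, List.nil_append]
  have hmem : ∀ x : Char,
      (PySem.Set.inter (PySem.Set.ofList mstr1.toList) mstr2.toList).contains x = true ↔
        x ∈ mstr1.toList ∧ x ∈ mstr2.toList := by
    intro x
    rw [PySem.Set.contains_iff, PySem.Set.mem_inter, PySem.Set.mem_ofList]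
  simp only [String.toList_ofList, String.toList_append, List.filter_append]
  congr 1
  · apply List.filter_congr
    intro x hx
    have := hmem x
    simp only [List.contains_eq_mem] at *
    by_cases h2 : x ∈ mstr2.toList <;> simp_all
  · apply List.filter_congr
    intro x hx
    have := hmem x
    simp only [List.contains_eq_mem] at *
    by_cases h1 : x ∈ mstr1.toList <;> simp_all

-- ===== VERDICT (by name: the statement is the Claim_ definition above) =====
theorem get_uniques_spec : Claim_equal_get_uniques := by
  intro m1 m2 _
  unfold Spec_get_uniques
  exact get_uniques_eq m1 m2
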